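-- pv_equiv track=rewrite | github.com/Jacksin131/Exam-4 | DSP_Exam4.py | raw_kmers
-- ===== SOURCE A (Python) =====
-- def raw_kmers(string, k):
--    # creates a dictionary of each possible substring and their respective number of occurances
--     counts = {}
--     kmers_num = len(string)-k+1
--     for i in range(kmers_num):
--         kmer = string[i:i+k]
--
--         if kmer not in counts:
--             counts[kmer] = 0
--         counts[kmer] +=1
--
--     # saves the total possible kmers
--     values = []
--     for i in counts:
--         values.append(counts.get(i))
--     x = sum(values)
--
--
--     # saves the observed substrings with the total
--     mers = []
--     for i in counts:
--         mers.append(str(i))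
--     y = len(mers)
--
--     return k,y,x
-- ===== SOURCE B (Python) =====
-- def raw_kmers(string, k):
--     # alternative algorithm: dedup by SORTING instead of hashing -- sort all k-mers,
--     # then one adjacent-comparison scan counts the runs (= distinct k-mers);
--     # total k-mers is the closed form len(string)-k+1 (floored at 0)
--     total = len(string) - k + 1
--     if total < 0:
--         total = 0
--     mers = sorted(string[i:i + k] for i in range(total))
--     distinct = 0
--     prev = None
--     for m in mers:
--         if m != prev:
--             distinct += 1
--             prev = m
--     return k, distinct, total
-- ===== Notes on version B (the rewrite author's own statement) =====
-- stated objective: alternative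
-- what changed: B deduplicates by sorting instead of hashing: it sorts all k-mers and counts run boundaries in one adjacent-comparison scan to get the distinct count, and computes the total as the closed form max(len(string)-k+1,0), replacing A's occurrence-counter dict and its two follow-up loops.
import Mathlib
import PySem

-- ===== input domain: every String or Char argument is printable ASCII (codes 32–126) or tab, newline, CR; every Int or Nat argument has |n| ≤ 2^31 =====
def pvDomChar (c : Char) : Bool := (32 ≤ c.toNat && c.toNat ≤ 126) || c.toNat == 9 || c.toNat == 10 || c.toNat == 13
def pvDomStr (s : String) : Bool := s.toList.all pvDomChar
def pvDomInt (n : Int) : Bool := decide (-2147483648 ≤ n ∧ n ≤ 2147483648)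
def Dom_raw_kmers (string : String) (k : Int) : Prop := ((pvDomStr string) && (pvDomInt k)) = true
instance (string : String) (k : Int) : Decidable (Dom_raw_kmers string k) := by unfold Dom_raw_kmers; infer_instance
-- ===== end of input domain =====

-- B deduplicates by sorting instead of hashing: it sorts all k-mers and counts run
-- boundaries in one adjacent scan; the total is the closed form max(len-k+1,0)
-- (objective: alternative algorithm, same result).
-- Python A returns the tuple (k, y, x); per the required signature it is ported as the list [k, y, x].

-- ===== PORT A =====
def raw_kmers (string : String) (k : Int) : List Int :=
  let kmers_num : Int := PySem.Str.len string - k + 1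
  let counts : PySem.Dict String Int :=
    (PySem.List.pyRange 0 kmers_num 1).foldl
      (fun counts i =>
        let kmer := PySem.Str.slice string (some i) (some (i + k))
        let counts := if counts.contains kmer then counts else counts.insert kmer 0
        counts.modify kmer 0 (· + 1))
      PySem.Dict.empty
  -- 'for i in counts: values.append(counts.get(i))': i ranges over the keys, so
  -- counts.get(i) is exactly the stored value; getD i 0 is exact here
  let values : List Int := counts.keys.foldl (fun values i => values ++ [counts.getD i 0]) []
  let x : Int := values.sum
  -- 'mers.append(str(i))': str(i) of a str key i is i itself
  let mers : List String := counts.keys.foldl (fun mers i => mers ++ [i]) []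
  let y : Int := mers.length
  [k, y, x]

-- ===== PORT B =====
def raw_kmers_alt (string : String) (k : Int) : List Int :=
  let total0 : Int := PySem.Str.len string - k + 1
  let total : Int := if total0 < 0 then 0 else total0
  -- sorted(...) on strings: Python's lexicographic order = Lean's String order on this
  -- ASCII domain; ported as the stdlib stable sort List.mergeSort
  let mers : List String :=
    ((PySem.List.pyRange 0 total 1).map
      (fun i => PySem.Str.slice string (some i) (some (i + k)))).mergeSort
      (fun a b => decide (a ≤ b))
  -- one scan over the sorted list counting run boundaries ('if m != prev')
  let st : Int × Option String :=
    mers.foldl (fun (s : Int × Option String) m =>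
      if s.2 = some m then s else (s.1 + 1, some m)) (0, none)
  [k, st.1, total]

-- ===== PRECONDITION & SPEC =====
def Spec_raw_kmers (string : String) (k : Int) (out : List Int) : Prop := out = raw_kmers_alt string k
instance (string : String) (k : Int) (out : List Int) : Decidable (Spec_raw_kmers string k out) := by unfold Spec_raw_kmers; infer_instance

-- ===== CLAIM =====
def Claim_equal_raw_kmers : Prop := ∀ (string : String) (k : Int), Dom_raw_kmers string k → Spec_raw_kmers string k (raw_kmers string k)

-- ===== LEMMAS AND PROOFS =====
-- the list of k-mers both ports slice out
def kmerList (string : String) (k : Int) : List String :=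
  (PySem.List.pyRange 0 (PySem.Str.len string - k + 1) 1).map
    (fun i => PySem.Str.slice string (some i) (some (i + k)))

-- A's loop body (insert-0-then-increment) is exactly the Counter update
theorem step_eq_modify (d : PySem.Dict String Int) (s : String) :
    (if d.contains s then d else d.insert s 0).modify s 0 (· + 1) = d.modify s 0 (· + 1) := by
  cases h : d.contains s
  · simp only [Bool.false_eq_true, if_false, PySem.Dict.modify,
      PySem.Dict.getD_insert_self, PySem.Dict.insert_insert_self,
      PySem.Dict.getD_of_not_contains d 0 h]
  · simp

theorem counts_eq_counter (string : String) (k : Int) :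
    ((PySem.List.pyRange 0 (PySem.Str.len string - k + 1) 1).foldl
      (fun counts i =>
        let kmer := PySem.Str.slice string (some i) (some (i + k))
        let counts := if counts.contains kmer then counts else counts.insert kmer 0
        counts.modify kmer 0 (· + 1))
      PySem.Dict.empty)
    = PySem.Dict.counter (kmerList string k) := by
  rw [PySem.Dict.counter_eq_foldl, kmerList, List.foldl_map]
  simp only [step_eq_modify]

-- sum over the distinct elements of their multiplicities is the length
theorem sum_counts (L : List String) :
    ((PySem.Set.ofList L).map (fun s => (L.count s : Int))).sum = (L.length : Int) := by
  have hperm : (PySem.Set.ofList L).Perm L.dedup :=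
    (List.perm_ext_iff_of_nodup (PySem.Set.nodup_ofList L) L.nodup_dedup).mpr
      (fun a => by simp [PySem.Set.mem_ofList, List.mem_dedup])
  rw [(hperm.map _).sum_eq]
  have h := List.sum_map_count_dedup_eq_length L
  have : (L.dedup.map (fun s => (L.count s : Int))) = (L.dedup.map (fun s => L.count s)).map (Nat.cast) := by
    rw [List.map_map]; rfl
  rw [this, ← Nat.cast_list_sum]
  simp only [List.count]
  exact_mod_cast congrArg (Nat.cast : Nat → Int) h

-- recursive run counters (the value of B's scan loop)
def runsFrom (a : String) : List String → Int
  | [] => 0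
  | b :: t => (if b = a then 0 else 1) + runsFrom b t

-- B's foldl from state (d, some a) adds runsFrom a l
theorem foldl_runs_some (l : List String) (d : Int) (a : String) :
    (l.foldl (fun (s : Int × Option String) m =>
      if s.2 = some m then s else (s.1 + 1, some m)) (d, some a)).1 = d + runsFrom a l := by
  induction l generalizing d a with
  | nil => simp [runsFrom]
  | cons b t ih =>
      simp only [List.foldl_cons, runsFrom]
      by_cases h : b = a
      · subst h; simp [ih]
      · have h' : ¬ (some a = some b) := by simpa [eq_comm] using h
        simp only [h', if_false, ih, h]
        ring

-- on a sorted list, the run count is the number of distinct elements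
theorem runsFrom_sorted (t : List String) : ∀ (a : String),
    (a :: t).Pairwise (· ≤ ·) → 1 + runsFrom a t = ((a :: t).toFinset.card : Int) := by
  induction t with
  | nil => intro a _; simp [runsFrom]
  | cons b t ih =>
      intro a hp
      have hab : a ≤ b := (List.pairwise_cons.mp hp).1 b (by simp)
      have hpt : (b :: t).Pairwise (· ≤ ·) := (List.pairwise_cons.mp hp).2
      by_cases h : b = a
      · subst h
        simp only [runsFrom]
        simp only [if_true, zero_add]
        have : (b :: b :: t).toFinset = (b :: t).toFinset := by
          simp [List.toFinset_cons]
        rw [this]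
        exact ih b hpt
      · have hnot : a ∉ (b :: t).toFinset := by
          simp only [List.mem_toFinset, List.mem_cons]
          rintro (rfl | hmem)
          · exact h rfl
          · have hbx : b ≤ a := (List.pairwise_cons.mp hpt).1 a hmem
            exact h (le_antisymm hbx hab)
        have hcard : ((a :: b :: t).toFinset.card : Int) = (b :: t).toFinset.card + 1 := by
          rw [List.toFinset_cons, Finset.card_insert_of_notMem hnot]
          push_cast; ring
        rw [hcard, ← ih b hpt]
        simp only [runsFrom, if_neg h]
        ring

-- B's scan on the sorted k-mer list counts the distinct k-mers
theorem scan_counts_distinct (L : List String) :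
    ((L.mergeSort (fun a b => decide (a ≤ b))).foldl (fun (s : Int × Option String) m =>
      if s.2 = some m then s else (s.1 + 1, some m)) (0, none)).1
    = ((PySem.Set.ofList L).length : Int) := by
  have hsetlen : (PySem.Set.ofList L).length = L.toFinset.card := by
    rw [← List.toFinset_card_of_nodup (PySem.Set.nodup_ofList L)]
    congr 1
    apply Finset.ext
    intro a
    simp [List.mem_toFinset, PySem.Set.mem_ofList]
  have hperm : (L.mergeSort (fun a b => decide (a ≤ b))).Perm L := List.mergeSort_perm L _
  have hfin : (L.mergeSort (fun a b => decide (a ≤ b))).toFinset = L.toFinset := by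
    apply Finset.ext
    intro x
    simp only [List.mem_toFinset]
    exact hperm.mem_iff
  cases hs : L.mergeSort (fun a b => decide (a ≤ b)) with
  | nil =>
      have : L = [] := by
        rw [hs] at hperm
        exact hperm.symm.eq_nil
      subst this
      simp [PySem.Set.ofList]
  | cons a t =>
      simp only [List.foldl_cons]
      rw [if_neg (by simp), foldl_runs_some]
      have hpw : (a :: t).Pairwise (· ≤ ·) := by
        have hb : (L.mergeSort (fun a b => decide (a ≤ b))).Pairwise
            (fun x y => (fun a b => decide (a ≤ b)) x y = true) :=
          List.pairwise_mergeSort (le := fun a b => decide (a ≤ b))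
            (fun a b c hab hbc => by simp_all; exact le_trans hab hbc)
            (fun a b => by simp [le_total]) L
        rw [hs] at hb
        exact hb.imp (fun h => by simpa using h)
      have := runsFrom_sorted t a hpw
      rw [← hs, hfin] at this
      rw [← hsetlen] at this
      linarith [this]

theorem pyRange_ite (m : Int) : PySem.List.pyRange 0 (if m < 0 then 0 else m) 1 = PySem.List.pyRange 0 m 1 := by
  rw [PySem.List.pyRange_one, PySem.List.pyRange_one]
  have : ((if m < 0 then 0 else m) - 0).toNat = (m - 0).toNat := by
    split_ifs <;> omega
  rw [this]

theorem raw_kmers_eq (string : String) (k : Int) :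
    raw_kmers string k =
      [k, ((PySem.Set.ofList (kmerList string k)).length : Int),
          max (PySem.Str.len string - k + 1) 0] := by
  simp only [raw_kmers]
  rw [counts_eq_counter]
  simp only [PySem.List.foldl_append_singleton_eq_map, List.nil_append, List.length_map,
    PySem.Dict.keys_counter, PySem.Dict.getD_counter]
  rw [sum_counts]
  have hlen : (kmerList string k).length = (PySem.Str.len string - k + 1 - 0).toNat := by
    rw [kmerList, List.length_map, PySem.List.length_pyRange_one]
  rw [hlen]
  have : (((PySem.Str.len string - k + 1 - 0).toNat : Int)) = max (PySem.Str.len string - k + 1) 0 := by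
    omega
  rw [this]

theorem raw_kmers_alt_eq (string : String) (k : Int) :
    raw_kmers_alt string k =
      [k, ((PySem.Set.ofList (kmerList string k)).length : Int),
          max (PySem.Str.len string - k + 1) 0] := by
  simp only [raw_kmers_alt]
  rw [pyRange_ite, ← kmerList, scan_counts_distinct]
  have : (if PySem.Str.len string - k + 1 < 0 then 0 else PySem.Str.len string - k + 1)
      = max (PySem.Str.len string - k + 1) 0 := by
    split_ifs <;> omega
  rw [this]

-- ===== VERDICT =====
theorem raw_kmers_spec : Claim_equal_raw_kmers := by
  intro string k _
  unfold Spec_raw_kmers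
  rw [raw_kmers_eq, raw_kmers_alt_eq]
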